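-- pv_equiv track=rewrite | github.com/Josh0104/red-scare-aldes-2025 | solved_many.py | solve_many_undirected_acyclic
-- ===== SOURCE A (Python) =====
-- from collections import deque, defaultdict
--
-- def solve_many_undirected_acyclic(adj, nodes, s, t, R):
--     """
--     Solves the 'Many' problem for an Undirected Acyclic Graph (Tree).
--     Since it's acyclic, a single modified BFS is sufficient to find the max
--     red cost path, as there is a unique simple path between any two nodes.
--     Time Complexity: O(V + E)
--     """
--
--     # Check if s and t exist
--     if s not in nodes or t not in nodes:
--         return -1
--
--     # DP[v] stores the max red cost path from s to v.
--     # We use a BFS approach since the graph is unweighted and acyclic.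
--
--     queue = deque()
--     # Cost maps stores the max red count found so far to reach node v.
--     max_red_cost = {node: -1 for node in nodes}
--
--     s_is_red = 1 if s in R else 0
--     max_red_cost[s] = s_is_red
--     queue.append(s)
--
--     while queue:
--         u = queue.popleft()
--
--         # Check neighbors
--         for v in adj.get(u, []):
--
--             # Since the graph is a tree (undirected acyclic), every edge
--             # is traversed only once in the BFS direction (away from s).
--             # The 'visited' concept is implicitly handled by only processing
--             # a neighbor if a better path to it is found (not necessary here
--             # due to unique paths, but good practice).
--
--             # Cost of v
--             v_cost = 1 if v in R else 0
--
--             new_cost = max_red_cost[u] + v_cost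
--
--             if max_red_cost[v] == -1:
--                 max_red_cost[v] = new_cost
--                 queue.append(v)
--
--             if v == t:
--                 return new_cost
--
--
--     return max_red_cost.get(t, -1)
-- ===== SOURCE B (Python) =====
-- from collections import deque
--
-- def solve_many_undirected_acyclic(adj, nodes, s, t, R):
--     # Alternative decomposition: BFS records parent pointers only; the red count is
--     # obtained by reconstructing the discovery path once t is scanned.
--     if s not in nodes or t not in nodes:
--         return -1
--     reds = set(R)
--     parent = {}
--     seen = {s}
--     queue = deque([s])
--     while queue:
--         u = queue.popleft()
--         for v in adj.get(u, []):
--             if v == t: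
--                 cnt = 1 if t in reds else 0
--                 cur = u
--                 while cur != s:
--                     cnt += 1 if cur in reds else 0
--                     cur = parent[cur]
--                 return cnt + (1 if s in reds else 0)
--             if v not in seen:
--                 seen.add(v)
--                 parent[v] = u
--                 queue.append(v)
--     return (1 if s in reds else 0) if t == s else -1
-- ===== Notes on version B (the rewrite author's own statement) =====
-- stated objective: alternative
-- what changed: Instead of carrying a max-red-cost value per node in a dict during the BFS, B's BFS records only parent pointers (plus a seen set and set(R)) and, the moment t is scanned, reconstructs the discovery path u->...->s once and counts the red nodes on it (plus t).
-- outside the precondition, e.g. on solve_many_undirected_acyclic({'s': ['t', 'x']}, {'t', 's'}, 's', 't', set()): A returns 0, B returns 0; on solve_many_undirected_acyclic({'s': ['x']}, {'t', 's'}, 's', 't', set()): A raises KeyError, B returns -1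
import Mathlib
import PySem

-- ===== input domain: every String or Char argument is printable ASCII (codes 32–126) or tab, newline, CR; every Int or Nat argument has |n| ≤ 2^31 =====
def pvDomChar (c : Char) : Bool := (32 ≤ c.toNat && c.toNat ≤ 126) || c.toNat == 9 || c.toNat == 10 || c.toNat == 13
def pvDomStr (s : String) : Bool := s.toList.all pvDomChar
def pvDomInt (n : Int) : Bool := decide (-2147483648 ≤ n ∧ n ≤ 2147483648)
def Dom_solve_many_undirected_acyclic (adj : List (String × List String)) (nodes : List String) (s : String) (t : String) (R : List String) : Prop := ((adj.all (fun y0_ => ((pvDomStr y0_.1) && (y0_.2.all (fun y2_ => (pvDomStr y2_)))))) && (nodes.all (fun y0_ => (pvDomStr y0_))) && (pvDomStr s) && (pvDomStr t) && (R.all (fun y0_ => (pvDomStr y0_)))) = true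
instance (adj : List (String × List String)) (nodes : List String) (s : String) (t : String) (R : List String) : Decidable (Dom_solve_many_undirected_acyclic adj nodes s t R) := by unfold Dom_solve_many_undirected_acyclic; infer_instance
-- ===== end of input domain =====

-- B replaces A's max-red-cost dictionary with a parent-pointer BFS that reconstructs the
-- discovery path to count red nodes only once t is scanned (objective: alternative decomposition).

-- ===== PORT A =====
-- inner `for v in adj.get(u, [])` loop of A: early return is Sum.inl, otherwise the
-- updated cost dict and the nodes appended to the queue.
def pvInnerA (t : String) (R : List String) (u : String) :
    List String → PySem.Dict String Int → List String →
    Sum Int (PySem.Dict String Int × List String)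
  | [], cost, qadds => .inr (cost, qadds)
  | v :: rest, cost, qadds =>
    let v_cost : Int := if v ∈ R then 1 else 0
    let new_cost : Int := cost.getD u (-1) + v_cost
    let st : PySem.Dict String Int × List String :=
      if cost.getD v (-1) = -1 then (cost.insert v new_cost, qadds ++ [v]) else (cost, qadds)
    if v = t then .inl new_cost else pvInnerA t R u rest st.1 st.2

-- `while queue:` loop of A; fuel = nodes.length + 1 bounds the number of pops (each pop
-- was one enqueue, and every node is enqueued at most once).
def pvLoopA (adj : List (String × List String)) (t : String) (R : List String) :
    Nat → List String → PySem.Dict String Int → Int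
  | _, [], cost => cost.getD t (-1)
  | 0, _ :: _, cost => cost.getD t (-1)
  | fuel + 1, u :: rest, cost =>
    match pvInnerA t R u ((PySem.Dict.mk adj).getD u []) cost [] with
    | .inl ans => ans
    | .inr (cost', adds) => pvLoopA adj t R fuel (rest ++ adds) cost'

def solve_many_undirected_acyclic (adj : List (String × List String)) (nodes : List String) (s : String) (t : String) (R : List String) : Int :=
  if s ∉ nodes ∨ t ∉ nodes then -1
  else
    let cost0 := nodes.foldl (fun d x => d.insert x (-1)) (PySem.Dict.empty : PySem.Dict String Int)
    let s_is_red : Int := if s ∈ R then 1 else 0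
    pvLoopA adj t R (nodes.length + 1) [s] (cost0.insert s s_is_red)

-- ===== PORT B =====
-- `while cur != s: cnt += (cur in reds); cur = parent[cur]` of B (fuel-bounded; under
-- Pre_ every parent chain reaches s in fewer than nodes.length + 1 steps).
def pvChainCnt (parent : PySem.Dict String String) (s : String) (reds : PySem.Set String) :
    Nat → String → Int
  | 0, _ => 0
  | fuel + 1, cur =>
    if cur = s then 0
    else
      (if cur ∈ reds then (1 : Int) else 0) +
        (match parent.get? cur with
         | some p => pvChainCnt parent s reds fuel p
         | none => 0)

-- inner neighbour loop of B: return the reconstructed count at t, else record parents.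
def pvInnerB (s t : String) (reds : PySem.Set String) (chainFuel : Nat) (u : String) :
    List String → PySem.Dict String String → PySem.Set String → List String →
    Sum Int (PySem.Dict String String × (PySem.Set String × List String))
  | [], parent, seen, qadds => .inr (parent, (seen, qadds))
  | v :: rest, parent, seen, qadds =>
    if v = t then
      .inl ((if t ∈ reds then (1 : Int) else 0) + pvChainCnt parent s reds chainFuel u +
            (if s ∈ reds then (1 : Int) else 0))
    else if v ∈ seen then pvInnerB s t reds chainFuel u rest parent seen qadds
    else pvInnerB s t reds chainFuel u rest (parent.insert v u) (PySem.Set.add seen v) (qadds ++ [v])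

def pvLoopB (adj : List (String × List String)) (s t : String) (reds : PySem.Set String)
    (chainFuel : Nat) :
    Nat → List String → PySem.Dict String String → PySem.Set String → Int
  | _, [], _, _ => if t = s then (if s ∈ reds then (1 : Int) else 0) else -1
  | 0, _ :: _, _, _ => if t = s then (if s ∈ reds then (1 : Int) else 0) else -1
  | fuel + 1, u :: rest, parent, seen =>
    match pvInnerB s t reds chainFuel u ((PySem.Dict.mk adj).getD u []) parent seen [] with
    | .inl ans => ans
    | .inr (parent', seen', adds) => pvLoopB adj s t reds chainFuel fuel (rest ++ adds) parent' seen'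

def solve_many_undirected_acyclic_alt (adj : List (String × List String)) (nodes : List String) (s : String) (t : String) (R : List String) : Int :=
  if s ∉ nodes ∨ t ∉ nodes then -1
  else
    let reds : PySem.Set String := PySem.Set.ofList R
    pvLoopB adj s t reds (nodes.length + 1) (nodes.length + 1) [s]
      PySem.Dict.empty (PySem.Set.add PySem.Set.empty s)

-- ===== PRECONDITION & SPEC =====
-- Pre_ requires every listed neighbour to lie in `nodes`: outside it A's
-- `max_red_cost[v]` lookup can raise KeyError (B simply never discovers such a
-- neighbour); when t happens to be scanned before the rogue neighbour both
-- programs still return the same value, so Pre_ is slightly narrower than the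
-- set of inputs on which A returns.  (When s or t is missing from nodes, A
-- returns -1 before touching adj, so the condition is only imposed then.)
def Pre_solve_many_undirected_acyclic (adj : List (String × List String)) (nodes : List String) (s : String) (t : String) (R : List String) : Prop :=
  s ∈ nodes ∧ t ∈ nodes → ∀ p ∈ adj, ∀ v ∈ p.2, v ∈ nodes
instance (adj : List (String × List String)) (nodes : List String) (s : String) (t : String) (R : List String) : Decidable (Pre_solve_many_undirected_acyclic adj nodes s t R) := by unfold Pre_solve_many_undirected_acyclic; infer_instance

def pvWitness_solve_many_undirected_acyclic : (List (String × List String)) × List String × String × String × List String :=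
  ([("s", ["t"]), ("t", ["s"])], ["s", "t"], "s", "t", ["t"])

def Spec_solve_many_undirected_acyclic (adj : List (String × List String)) (nodes : List String) (s : String) (t : String) (R : List String) (out : Int) : Prop := out = solve_many_undirected_acyclic_alt adj nodes s t R
instance (adj : List (String × List String)) (nodes : List String) (s : String) (t : String) (R : List String) (out : Int) : Decidable (Spec_solve_many_undirected_acyclic adj nodes s t R out) := by unfold Spec_solve_many_undirected_acyclic; infer_instance

-- ===== CLAIM (what is proved, stated in full; the proofs are below) =====
def Claim_equal_solve_many_undirected_acyclic : Prop := ∀ (adj : List (String × List String)) (nodes : List String) (s : String) (t : String) (R : List String), Dom_solve_many_undirected_acyclic adj nodes s t R → Pre_solve_many_undirected_acyclic adj nodes s t R → Spec_solve_many_undirected_acyclic adj nodes s t R (solve_many_undirected_acyclic adj nodes s t R)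

-- ===== LEMMAS AND PROOFS =====

-- the BFS-tree chain from x back to s through `parent`, of length n, through seen nodes
inductive pvCh (parent : PySem.Dict String String) (seen : List String) (s : String) :
    String → Nat → Prop
  | base : pvCh parent seen s s 0
  | step (x p : String) (n : Nat) : x ≠ s → x ∈ seen → parent.get? x = some p →
      pvCh parent seen s p n → pvCh parent seen s x (n + 1)

-- cost.getD x (-1) in A equals "reds on the parent chain of x" + red(s) in B
def pvGood (parent : PySem.Dict String String) (seen : List String)
    (cost : PySem.Dict String Int) (s : String) (R : List String) (x : String) : Prop :=
  ∃ n : Nat, n + 1 ≤ seen.length ∧ pvCh parent seen s x n ∧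
    ∀ f : Nat, n < f →
      cost.getD x (-1) =
        (if s ∈ R then (1 : Int) else 0) + pvChainCnt parent s (PySem.Set.ofList R) f x

-- the coupling invariant between A's state (cost) and B's state (parent, seen)
def pvInv (nodes : List String) (s t : String) (R : List String)
    (cost : PySem.Dict String Int) (parent : PySem.Dict String String)
    (seen : PySem.Set String) : Prop :=
  seen.Nodup ∧ (∀ x ∈ seen, x ∈ nodes) ∧ s ∈ seen ∧ (t ∈ seen → t = s) ∧
  (∀ x, x ∈ seen ↔ cost.getD x (-1) ≠ -1) ∧
  (∀ x ∈ seen, pvGood parent seen cost s R x)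

def pvInnerRel (nodes : List String) (s t : String) (R : List String) (seen : PySem.Set String)
    (ra : Sum Int (PySem.Dict String Int × List String))
    (rb : Sum Int (PySem.Dict String String × (PySem.Set String × List String))) : Prop :=
  (∃ a, ra = .inl a ∧ rb = .inl a) ∨
  (∃ cost' parent' seen' adds, ra = .inr (cost', adds) ∧ rb = .inr (parent', (seen', adds)) ∧
     pvInv nodes s t R cost' parent' seen' ∧ (∀ x ∈ seen, x ∈ seen') ∧ (∀ x ∈ adds, x ∈ seen'))

lemma pvRed_ofList (R : List String) (v : String) :
    (if v ∈ PySem.Set.ofList R then (1 : Int) else 0) = if v ∈ R then 1 else 0 := by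
  simp [PySem.Set.mem_ofList]

lemma pvChainCnt_nonneg (parent : PySem.Dict String String) (s : String)
    (reds : PySem.Set String) : ∀ (f : Nat) (cur : String), 0 ≤ pvChainCnt parent s reds f cur := by
  intro f
  induction f with
  | zero => intro cur; simp [pvChainCnt]
  | succ f ih =>
    intro cur
    have h2 : (0 : Int) ≤ match parent.get? cur with
      | some p => pvChainCnt parent s reds f p
      | none => 0 := by
      cases parent.get? cur with
      | some p => exact ih p
      | none => exact le_refl 0
    simp only [pvChainCnt]
    split_ifs with h hr
    · exact le_refl 0
    · omega
    · omega

lemma pvCh_self (parent : PySem.Dict String String) (seen : List String) (s : String) (n : Nat)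
    (h : pvCh parent seen s s n) : n = 0 := by
  cases h with
  | base => rfl
  | step _ _ _ hx => exact absurd rfl hx

lemma pvCh_mono (parent : PySem.Dict String String) (seen seen' : List String) (s x : String)
    (n : Nat) (hsub : ∀ y ∈ seen, y ∈ seen') (h : pvCh parent seen s x n) :
    pvCh parent seen' s x n := by
  induction h with
  | base => exact .base
  | step x p n hx hmem hget _ ih => exact .step x p n hx (hsub x hmem) hget ih

lemma pvCh_insert (parent : PySem.Dict String String) (seen : List String) (s x v u : String)
    (n : Nat) (hv : v ∉ seen) (h : pvCh parent seen s x n) :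
    pvCh (parent.insert v u) seen s x n := by
  induction h with
  | base => exact .base
  | step x p n hx hmem hget _ ih =>
    refine .step x p n hx hmem ?_ ih
    have hne : x ≠ v := fun he => hv (he ▸ hmem)
    rw [PySem.Dict.get?_insert_of_ne parent u hne]
    exact hget

lemma pvChainCnt_insert_fresh (parent : PySem.Dict String String) (seen : List String)
    (reds : PySem.Set String) (s x v u : String) (n : Nat) (hv : v ∉ seen)
    (h : pvCh parent seen s x n) : ∀ f : Nat, n < f →
    pvChainCnt (parent.insert v u) s reds f x = pvChainCnt parent s reds f x := by
  induction h with
  | base =>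
    intro f hf
    obtain ⟨f', rfl⟩ : ∃ f', f = f' + 1 := ⟨f - 1, by omega⟩
    simp [pvChainCnt]
  | step x p n hx hmem hget _ ih =>
    intro f hf
    obtain ⟨f', rfl⟩ : ∃ f', f = f' + 1 := ⟨f - 1, by omega⟩
    have hne : x ≠ v := fun he => hv (he ▸ hmem)
    simp only [pvChainCnt, if_neg hx, PySem.Dict.get?_insert_of_ne parent u hne, hget]
    rw [ih f' (by omega)]

lemma pvGood_cost_nonneg (parent : PySem.Dict String String) (seen : List String)
    (cost : PySem.Dict String Int) (s : String) (R : List String) (x : String)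
    (h : pvGood parent seen cost s R x) : 0 ≤ cost.getD x (-1) := by
  obtain ⟨n, _, _, hval⟩ := h
  have hc := hval (n + 1) (by omega)
  have h1 : (0 : Int) ≤ if s ∈ R then (1 : Int) else 0 := by split_ifs <;> omega
  have h2 := pvChainCnt_nonneg parent s (PySem.Set.ofList R) (n + 1) x
  omega

lemma pvAdj_mem (adj : List (String × List String)) (nodes : List String)
    (hpre : ∀ p ∈ adj, ∀ v ∈ p.2, v ∈ nodes) (u v : String)
    (hv : v ∈ (PySem.Dict.mk adj).getD u []) : v ∈ nodes := by
  rw [PySem.Dict.getD_eq_get?_getD] at hv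
  cases hget : (PySem.Dict.mk adj).get? u with
  | none => rw [hget] at hv; simp at hv
  | some l =>
    rw [hget] at hv
    have hmem := PySem.Dict.mem_items_of_get?_eq_some (PySem.Dict.mk adj) hget
    exact hpre (u, l) hmem v hv

lemma pvFinal_eq (nodes : List String) (s t : String) (R : List String)
    (cost : PySem.Dict String Int) (parent : PySem.Dict String String)
    (seen : PySem.Set String) (hInv : pvInv nodes s t R cost parent seen) :
    cost.getD t (-1) = if t = s then (if s ∈ PySem.Set.ofList R then (1 : Int) else 0) else -1 := by
  obtain ⟨hnodup, hsubn, hsmem, htmem, hiff, hgood⟩ := hInv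
  by_cases hts : t = s
  · subst hts
    obtain ⟨n, hn, hch, hval⟩ := hgood t hsmem
    have hn0 : n = 0 := pvCh_self parent seen t n hch
    subst hn0
    have hc := hval 1 (by omega)
    have h0 : pvChainCnt parent t (PySem.Set.ofList R) 1 t = 0 := by simp [pvChainCnt]
    rw [h0, add_zero] at hc
    rw [if_pos rfl, pvRed_ofList, hc]
  · rw [if_neg hts]
    have hnmem : t ∉ seen := fun h => hts (htmem h)
    have := (hiff t).not.mp hnmem
    omega

lemma pvInner_sim (nodes : List String) (s t : String)
    (R : List String) (u : String) :
    ∀ (vs : List String) (cost : PySem.Dict String Int) (parent : PySem.Dict String String)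
      (seen : PySem.Set String) (qadds : List String),
      (∀ v ∈ vs, v ∈ nodes) →
      pvInv nodes s t R cost parent seen →
      u ∈ seen →
      (∀ x ∈ qadds, x ∈ seen) →
      pvInnerRel nodes s t R seen (pvInnerA t R u vs cost qadds)
        (pvInnerB s t (PySem.Set.ofList R) (nodes.length + 1) u vs parent seen qadds) := by
  intro vs
  induction vs with
  | nil =>
    intro cost parent seen qadds _ hInv _ hq
    exact Or.inr ⟨cost, parent, seen, qadds, rfl, rfl, hInv, fun x hx => hx, fun x hx => hq x hx⟩
  | cons v rest ih =>
    intro cost parent seen qadds hvs hInv hu hq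
    obtain ⟨hnodup, hsubn, hsmem, htmem, hiff, hgood⟩ := hInv
    have hlen : seen.length ≤ nodes.length := (List.subperm_of_subset hnodup hsubn).length_le
    by_cases hvt : v = t
    · -- early return in both
      obtain ⟨n, hn, hch, hval⟩ := hgood u hu
      have hcost := hval (nodes.length + 1) (by omega)
      refine Or.inl ⟨cost.getD u (-1) + (if v ∈ R then (1 : Int) else 0), ?_, ?_⟩
      · simp only [pvInnerA, if_pos hvt]
      · simp only [pvInnerB, if_pos hvt]
        rw [pvRed_ofList, pvRed_ofList, ← hvt, hcost]
        congr 1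
        ring
    · by_cases hdisc : cost.getD v (-1) = -1
      · -- v freshly discovered
        have hvseen : v ∉ seen := fun h => ((hiff v).mp h) hdisc
        have hvnodes : v ∈ nodes := hvs v List.mem_cons_self
        have hvns : v ≠ s := fun he => hvseen (he ▸ hsmem)
        have hadd : PySem.Set.add seen v = seen ++ [v] := PySem.Set.add_of_not_mem hvseen
        obtain ⟨n, hn, hchu, hvalu⟩ := hgood u hu
        have hcu_nonneg : 0 ≤ cost.getD u (-1) :=
          pvGood_cost_nonneg parent seen cost s R u ⟨n, hn, hchu, hvalu⟩
        obtain ⟨redv, hredv⟩ : ∃ r : Int, r = if v ∈ R then (1 : Int) else 0 := ⟨_, rfl⟩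
        have hredv_nonneg : (0 : Int) ≤ redv := by rw [hredv]; split_ifs <;> omega
        obtain ⟨newc, hnewc⟩ : ∃ c : Int, c = cost.getD u (-1) + redv := ⟨_, rfl⟩
        have hInv' : pvInv nodes s t R (cost.insert v newc) (parent.insert v u) (seen ++ [v]) := by
          refine ⟨?_, ?_, ?_, ?_, ?_, ?_⟩
          · simp [List.nodup_append, hnodup]
            exact fun a ha hav => hvseen (hav ▸ ha)
          · intro x hx
            rcases List.mem_append.mp hx with h | h
            · exact hsubn x h
            · simp at h; exact h ▸ hvnodes
          · exact List.mem_append_left _ hsmem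
          · intro hx
            rcases List.mem_append.mp hx with h | h
            · exact htmem h
            · simp at h; exact absurd h.symm hvt
          · intro x
            rw [PySem.Dict.getD_insert]
            by_cases hxv : x = v
            · rw [if_pos hxv, hxv, List.mem_append, List.mem_singleton]
              have h0 : (0 : Int) ≤ newc := by
                rw [hnewc]; exact add_nonneg hcu_nonneg hredv_nonneg
              constructor
              · intro _; omega
              · intro _; exact Or.inr rfl
            · rw [if_neg hxv, List.mem_append]
              simp only [List.mem_singleton, hxv, or_false]
              exact hiff x
          · intro x hx
            rcases List.mem_append.mp hx with hxs | hxv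
            · obtain ⟨m, hm, hchx, hvx⟩ := hgood x hxs
              refine ⟨m, ?_, ?_, ?_⟩
              · rw [List.length_append]; simp; omega
              · exact pvCh_mono _ _ _ _ _ _ (fun y hy => List.mem_append_left _ hy)
                  (pvCh_insert _ _ _ _ _ u _ hvseen hchx)
              · intro f hf
                rw [PySem.Dict.getD_insert,
                  if_neg (show x ≠ v from fun he => hvseen (by rwa [he] at hxs))]
                rw [pvChainCnt_insert_fresh parent seen _ s x v u m hvseen hchx f hf]
                exact hvx f hf
            · rw [List.mem_singleton] at hxv
              rw [hxv]
              refine ⟨n + 1, ?_, ?_, ?_⟩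
              · rw [List.length_append]; simp; omega
              · refine pvCh.step v u n hvns (List.mem_append_right _ List.mem_cons_self)
                  (PySem.Dict.get?_insert_self parent v u) ?_
                exact pvCh_mono _ _ _ _ _ _ (fun y hy => List.mem_append_left _ hy)
                  (pvCh_insert _ _ _ _ _ u _ hvseen hchu)
              · intro f hf
                obtain ⟨f', rfl⟩ : ∃ f', f = f' + 1 := ⟨f - 1, by omega⟩
                rw [PySem.Dict.getD_insert, if_pos rfl]
                simp only [pvChainCnt, if_neg hvns, PySem.Dict.get?_insert_self]
                rw [pvChainCnt_insert_fresh parent seen _ s u v u n hvseen hchu f' (by omega)]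
                have hcu := hvalu f' (by omega)
                rw [pvRed_ofList, ← hredv, hnewc, hcu]
                ring
          -- (end of hInv')
        have hrec := ih (cost.insert v newc) (parent.insert v u) (seen ++ [v]) (qadds ++ [v])
          (fun w hw => hvs w (List.mem_cons_of_mem v hw)) hInv'
          (List.mem_append_left _ hu)
          (fun x hx => by
            rcases List.mem_append.mp hx with h | h
            · exact List.mem_append_left _ (hq x h)
            · exact List.mem_append_right _ h)
        have hA : pvInnerA t R u (v :: rest) cost qadds =
            pvInnerA t R u rest (cost.insert v newc) (qadds ++ [v]) := by
          simp only [pvInnerA, if_neg hvt, if_pos hdisc, ← hredv, ← hnewc]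
        have hB : pvInnerB s t (PySem.Set.ofList R) (nodes.length + 1) u (v :: rest) parent seen qadds =
            pvInnerB s t (PySem.Set.ofList R) (nodes.length + 1) u rest (parent.insert v u)
              (seen ++ [v]) (qadds ++ [v]) := by
          simp only [pvInnerB, if_neg hvt, if_neg hvseen, hadd]
        rw [hA, hB]
        rcases hrec with ⟨a, ha, hb⟩ | ⟨cost', parent', seen', adds, ha, hb, hI, hsub, hadds⟩
        · exact Or.inl ⟨a, ha, hb⟩
        · exact Or.inr ⟨cost', parent', seen', adds, ha, hb, hI,
            fun x hx => hsub x (List.mem_append_left _ hx), hadds⟩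
      · -- v already discovered: both skip
        have hvseen : v ∈ seen := (hiff v).mpr hdisc
        have hA : pvInnerA t R u (v :: rest) cost qadds = pvInnerA t R u rest cost qadds := by
          simp only [pvInnerA, if_neg hvt, if_neg hdisc]
        have hB : pvInnerB s t (PySem.Set.ofList R) (nodes.length + 1) u (v :: rest) parent seen qadds =
            pvInnerB s t (PySem.Set.ofList R) (nodes.length + 1) u rest parent seen qadds := by
          simp only [pvInnerB, if_neg hvt, if_pos hvseen]
        rw [hA, hB]
        exact ih cost parent seen qadds (fun w hw => hvs w (List.mem_cons_of_mem v hw))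
          ⟨hnodup, hsubn, hsmem, htmem, hiff, hgood⟩ hu hq

lemma pvLoop_sim (adj : List (String × List String)) (nodes : List String) (s t : String)
    (R : List String) (hpre : ∀ p ∈ adj, ∀ v ∈ p.2, v ∈ nodes) :
    ∀ (fuel : Nat) (queue : List String) (cost : PySem.Dict String Int)
      (parent : PySem.Dict String String) (seen : PySem.Set String),
      pvInv nodes s t R cost parent seen → (∀ x ∈ queue, x ∈ seen) →
      pvLoopA adj t R fuel queue cost =
        pvLoopB adj s t (PySem.Set.ofList R) (nodes.length + 1) fuel queue parent seen := by
  intro fuel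
  induction fuel with
  | zero =>
    intro queue cost parent seen hInv _
    cases queue with
    | nil => exact pvFinal_eq nodes s t R cost parent seen hInv
    | cons u rest => exact pvFinal_eq nodes s t R cost parent seen hInv
  | succ fuel ih =>
    intro queue cost parent seen hInv hq
    cases queue with
    | nil => exact pvFinal_eq nodes s t R cost parent seen hInv
    | cons u rest =>
      have hvs : ∀ w ∈ (PySem.Dict.mk adj).getD u [], w ∈ nodes :=
        fun w hw => pvAdj_mem adj nodes hpre u w hw
      have hrel := pvInner_sim nodes s t R u ((PySem.Dict.mk adj).getD u []) cost parent seen []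
        hvs hInv (hq u List.mem_cons_self) (fun x hx => absurd hx (List.not_mem_nil))
      simp only [pvLoopA, pvLoopB]
      rcases hrel with ⟨a, ha, hb⟩ | ⟨cost', parent', seen', adds, ha, hb, hInv', hsub, hadds⟩
      · rw [ha, hb]
      · rw [ha, hb]
        exact ih (rest ++ adds) cost' parent' seen' hInv'
          (fun x hx => by
            rcases List.mem_append.mp hx with h | h
            · exact hsub x (hq x (List.mem_cons_of_mem u h))
            · exact hadds x h)

lemma pvInit_getD (y : String) : ∀ (l : List String) (d : PySem.Dict String Int),
    (∀ x, d.getD x (-1) = -1) → ((l.foldl (fun d x => d.insert x (-1)) d).getD y (-1) = -1) := by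
  intro l
  induction l with
  | nil => intro d hd; exact hd y
  | cons a l ih =>
    intro d hd
    simp only [List.foldl_cons]
    exact ih (d.insert a (-1)) (fun x => by rw [PySem.Dict.getD_insert]; split_ifs <;> simp [hd])

theorem solve_many_undirected_acyclic_spec : Claim_equal_solve_many_undirected_acyclic := by
  intro adj nodes s t R _hdom hpre
  unfold Spec_solve_many_undirected_acyclic
  unfold solve_many_undirected_acyclic solve_many_undirected_acyclic_alt
  by_cases hg : s ∉ nodes ∨ t ∉ nodes
  · rw [if_pos hg, if_pos hg]
  · rw [if_neg hg, if_neg hg]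
    have hs : s ∈ nodes := by by_contra h; exact hg (Or.inl h)
    have ht : t ∈ nodes := by by_contra h; exact hg (Or.inr h)
    have hadd : PySem.Set.add (PySem.Set.empty : PySem.Set String) s = [s] :=
      PySem.Set.add_of_not_mem (List.not_mem_nil)
    rw [hadd]
    set cost0 := nodes.foldl (fun d x => d.insert x (-1)) (PySem.Dict.empty : PySem.Dict String Int)
      with hcost0
    have hc0 : ∀ x, cost0.getD x (-1) = -1 :=
      fun x => pvInit_getD x nodes PySem.Dict.empty (fun y => PySem.Dict.getD_empty y (-1))
    set redS : Int := if s ∈ R then (1 : Int) else 0 with hredS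
    have hredS_ne : redS ≠ -1 := by rw [hredS]; split_ifs <;> omega
    have hInv0 : pvInv nodes s t R (cost0.insert s redS) PySem.Dict.empty [s] := by
      refine ⟨List.nodup_singleton s, ?_, List.mem_singleton_self s, ?_, ?_, ?_⟩
      · intro x hx; rw [List.mem_singleton] at hx; exact hx ▸ hs
      · intro hx; exact (List.mem_singleton.mp hx)
      · intro x
        rw [PySem.Dict.getD_insert, List.mem_singleton]
        by_cases hxs : x = s
        · rw [if_pos hxs]
          exact ⟨fun _ => hredS_ne, fun _ => hxs⟩
        · rw [if_neg hxs, hc0 x]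
          exact ⟨fun h => absurd h hxs, fun h => absurd rfl h⟩
      · intro x hx
        rw [List.mem_singleton] at hx
        rw [hx]
        refine ⟨0, by simp, .base, ?_⟩
        intro f hf
        obtain ⟨f', rfl⟩ : ∃ f', f = f' + 1 := ⟨f - 1, by omega⟩
        have h0 : pvChainCnt PySem.Dict.empty s (PySem.Set.ofList R) (f' + 1) s = 0 := by
          simp [pvChainCnt]
        rw [PySem.Dict.getD_insert, if_pos rfl, h0, add_zero]
    exact pvLoop_sim adj nodes s t R (hpre ⟨hs, ht⟩) (nodes.length + 1) [s] (cost0.insert s redS)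
      PySem.Dict.empty [s] hInv0 (fun x hx => hx)
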